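-- pv_equiv track=rewrite | github.com/gitgab22/mastermind_helper | main.py | remove_similar_sublists
-- ===== SOURCE A (Python) =====
-- def remove_similar_sublists(L):
--     Q = []
--     for sublist in L:
--         Lp = [sublist[0]]
--         Test = True
--         for i in range(1, 4):
--             if sublist[i] in Lp:
--                 Test = False
--                 break
--             Lp.append(sublist[i])
--         if Test == True:
--             Q.append(sublist)
--     return Q
-- ===== SOURCE B (Python) =====
-- def _distinct4(s):
--     # sort-then-adjacent-scan: the four values are pairwise distinct
--     # exactly when no two neighbours in their sorted order are equal
--     t = sorted((s[0], s[1], s[2], s[3]))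
--     return t[0] != t[1] and t[1] != t[2] and t[2] != t[3]
--
-- def remove_similar_sublists(L):
--     return [s for s in L if _distinct4(s)]
-- ===== Notes on version B (the rewrite author's own statement) =====
-- stated objective: alternative
-- what changed: Replaces A's grow-a-seen-list membership scan by sorting the four leading values and checking only the three adjacent pairs of the sorted tuple for equality (sort-then-scan instead of incremental membership testing).
-- outside the precondition, e.g. on remove_similar_sublists([[9, 2, 2], [3, 0, 0], [2, 2, 0]]): A returns [], B raises IndexError
import Mathlib
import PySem

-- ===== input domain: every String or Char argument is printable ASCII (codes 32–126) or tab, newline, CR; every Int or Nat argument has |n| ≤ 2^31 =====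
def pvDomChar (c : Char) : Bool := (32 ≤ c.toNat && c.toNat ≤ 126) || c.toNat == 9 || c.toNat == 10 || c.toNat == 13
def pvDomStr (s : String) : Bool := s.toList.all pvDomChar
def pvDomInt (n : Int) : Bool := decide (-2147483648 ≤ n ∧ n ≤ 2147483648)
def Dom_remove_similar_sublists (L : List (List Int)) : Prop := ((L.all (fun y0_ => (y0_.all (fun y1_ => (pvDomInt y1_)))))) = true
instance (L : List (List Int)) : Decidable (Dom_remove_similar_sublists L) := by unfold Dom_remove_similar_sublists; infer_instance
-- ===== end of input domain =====

-- B tests distinctness of the four leading values by sorting them and comparing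
-- only adjacent pairs of the sorted tuple, instead of A's growing seen-list scan.

-- ===== PORT A =====
-- inner 'for i in range(1,4): if sublist[i] in Lp: Test=False; break; Lp.append(sublist[i])'
-- (break modelled by the recursion stopping with false; sublist[i] via pyGetD, exact under Pre_)
def pvAInner (sub : List Int) : List Int → List Int → Bool
  | [], _ => true
  | i :: rest, Lp =>
      if PySem.List.pyGetD sub i 0 ∈ Lp then false
      else pvAInner sub rest (Lp ++ [PySem.List.pyGetD sub i 0])

def remove_similar_sublists (L : List (List Int)) : List (List Int) :=
  L.foldl (fun Q sub =>
    if pvAInner sub (PySem.List.pyRange 1 4 1) [PySem.List.pyGetD sub 0 0]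
    then Q ++ [sub] else Q) []

-- ===== PORT B =====
-- t = sorted((s[0], s[1], s[2], s[3])); t[0] != t[1] and t[1] != t[2] and t[2] != t[3]
def pvDistinct4 (s : List Int) : Bool :=
  let t := PySem.List.sorted
    [PySem.List.pyGetD s 0 0, PySem.List.pyGetD s 1 0,
     PySem.List.pyGetD s 2 0, PySem.List.pyGetD s 3 0] (fun x => x) false
  decide (PySem.List.pyGetD t 0 0 ≠ PySem.List.pyGetD t 1 0) &&
  decide (PySem.List.pyGetD t 1 0 ≠ PySem.List.pyGetD t 2 0) &&
  decide (PySem.List.pyGetD t 2 0 ≠ PySem.List.pyGetD t 3 0)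

def remove_similar_sublists_alt (L : List (List Int)) : List (List Int) :=
  L.filter pvDistinct4

-- ===== PRECONDITION & SPEC =====
-- Pre_ excludes inputs where some sublist has fewer than 4 elements: Python A
-- raises IndexError there except when an early duplicate makes its loop break
-- before reaching the missing index (an accident of the break); B raises there.
def Pre_remove_similar_sublists (L : List (List Int)) : Prop :=
  ∀ s ∈ L, 4 ≤ s.length
instance (L : List (List Int)) : Decidable (Pre_remove_similar_sublists L) := by
  unfold Pre_remove_similar_sublists; infer_instance
def pvWitness_remove_similar_sublists : List (List Int) := [[1, 2, 3, 4], [1, 1, 2, 3]]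

def Spec_remove_similar_sublists (L : List (List Int)) (out : List (List Int)) : Prop := out = remove_similar_sublists_alt L
instance (L : List (List Int)) (out : List (List Int)) : Decidable (Spec_remove_similar_sublists L out) := by unfold Spec_remove_similar_sublists; infer_instance

-- ===== CLAIM (what is proved, stated in full; the proofs are below) =====
def Claim_equal_remove_similar_sublists : Prop := ∀ (L : List (List Int)), Dom_remove_similar_sublists L → Pre_remove_similar_sublists L → Spec_remove_similar_sublists L (remove_similar_sublists L)

-- ===== LEMMAS AND PROOFS =====

-- A's inner seen-list loop accepts exactly when the four leading values are pairwise distinct.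
theorem pvInner_eq_nodup (s : List Int) :
    pvAInner s (PySem.List.pyRange 1 4 1) [PySem.List.pyGetD s 0 0]
      = decide ([PySem.List.pyGetD s 0 0, PySem.List.pyGetD s 1 0,
                 PySem.List.pyGetD s 2 0, PySem.List.pyGetD s 3 0].Nodup) := by
  have h : PySem.List.pyRange 1 4 1 = [1, 2, 3] := by decide
  rw [h]
  simp only [pvAInner, List.mem_cons, List.mem_singleton, List.not_mem_nil,
    List.nodup_cons, List.nodup_nil]
  by_cases h01 : PySem.List.pyGetD s 1 0 = PySem.List.pyGetD s 0 0 <;>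
  by_cases h02 : PySem.List.pyGetD s 2 0 = PySem.List.pyGetD s 0 0 <;>
  by_cases h12 : PySem.List.pyGetD s 2 0 = PySem.List.pyGetD s 1 0 <;>
  by_cases h03 : PySem.List.pyGetD s 3 0 = PySem.List.pyGetD s 0 0 <;>
  by_cases h13 : PySem.List.pyGetD s 3 0 = PySem.List.pyGetD s 1 0 <;>
  by_cases h23 : PySem.List.pyGetD s 3 0 = PySem.List.pyGetD s 2 0 <;>
  simp_all <;> tauto

-- For a ≤-ordered quadruple, adjacent inequality is full distinctness.
theorem pvAdjSortedNodup (w x y z : Int) (h1 : w ≤ x) (h2 : x ≤ y) (h3 : y ≤ z) :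
    (decide (w ≠ x) && decide (x ≠ y) && decide (y ≠ z))
      = decide ([w, x, y, z].Nodup) := by
  simp only [List.nodup_cons, List.mem_cons, List.not_mem_nil, List.nodup_nil]
  by_cases hwx : w = x <;> by_cases hxy : x = y <;> by_cases hyz : y = z <;>
    simp_all <;> omega

-- B's sort-then-adjacent check accepts exactly when the four values are pairwise distinct.
theorem pvDistinct4_eq_nodup (s : List Int) :
    pvDistinct4 s
      = decide ([PySem.List.pyGetD s 0 0, PySem.List.pyGetD s 1 0,
                 PySem.List.pyGetD s 2 0, PySem.List.pyGetD s 3 0].Nodup) := by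
  set a := PySem.List.pyGetD s 0 0 with ha
  set b := PySem.List.pyGetD s 1 0 with hb
  set c := PySem.List.pyGetD s 2 0 with hc
  set d := PySem.List.pyGetD s 3 0 with hd
  unfold pvDistinct4
  rw [← ha, ← hb, ← hc, ← hd]
  set t := PySem.List.sorted [a, b, c, d] (fun x => x) false with ht
  have hp : t.Perm [a, b, c, d] := PySem.List.sorted_perm _ _ _
  have hpw : t.Pairwise (fun x y => (fun v : Int => v) x ≤ (fun v : Int => v) y) :=
    PySem.List.sorted_pairwise _ _
  have hlen : t.length = 4 := by
    have := hp.length_eq; simpa using this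
  clear ht
  match t, hlen, hp, hpw with
  | [w, x, y, z], _, hp, hpw =>
    have hnd : decide ([w, x, y, z].Nodup) = decide ([a, b, c, d].Nodup) :=
      decide_eq_decide.mpr hp.nodup_iff
    rw [← hnd]
    simp only [List.pairwise_cons, List.mem_cons, List.not_mem_nil, List.mem_singleton] at hpw
    have e0 : PySem.List.pyGetD [w, x, y, z] 0 0 = w := rfl
    have e1 : PySem.List.pyGetD [w, x, y, z] 1 0 = x := rfl
    have e2 : PySem.List.pyGetD [w, x, y, z] 2 0 = y := rfl
    have e3 : PySem.List.pyGetD [w, x, y, z] 3 0 = z := rfl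
    simp only [e0, e1, e2, e3]
    exact pvAdjSortedNodup w x y z (hpw.1 x (Or.inl rfl)) (hpw.2.1 y (Or.inl rfl))
      (hpw.2.2.1 z (Or.inl rfl))

-- ===== VERDICT (by name: the statement is the Claim_ definition above) =====
theorem remove_similar_sublists_spec : Claim_equal_remove_similar_sublists := by
  intro L _ _
  unfold Spec_remove_similar_sublists remove_similar_sublists remove_similar_sublists_alt
  rw [PySem.List.foldl_append_if_eq_filter]
  simp only [List.nil_append]
  apply List.filter_congr
  intro s hs
  rw [pvInner_eq_nodup, pvDistinct4_eq_nodup]
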